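-- pv_equiv track=rewrite | github.com/RobbeW/Data_Statistiek_R | Deel 3 Algoritmiek/02 Dictionaries/Evaluatie/06 Super Shot/solution/solution.nl.py | winnaar
-- ===== SOURCE A (Python) =====
-- def winnaar(scores):
--     result = {}
--     for voornaam, punten in scores:
--         if voornaam in result:
--             result[voornaam] += punten
--         else:
--             result[voornaam] = punten
--
--     winnaars = []
--     m = 0
--     for voornaam, punten in result.items():
--         if punten > m:
--             m = punten
--             winnaars = [voornaam]
--         elif punten == m:
--             winnaars.append(voornaam)
--
--     return winnaars
-- ===== SOURCE B (Python) =====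
-- def winnaar(scores):
--     # distinct names in first-occurrence order (no dict, no running aggregation)
--     names = []
--     for naam, _ in scores:
--         if naam not in names:
--             names.append(naam)
--     # per-name total by a full scan of scores for each name
--     totals = [(naam, sum(p for n, p in scores if n == naam)) for naam in names]
--     m = max([p for _, p in totals] + [0])
--     return [naam for naam, p in totals if p == m]
-- ===== Notes on version B (the rewrite author's own statement) =====
-- stated objective: alternative
-- what changed: Drops the dict and the running-max-with-reset loop entirely: B first collects the distinct names in first-occurrence order, then computes each name's total by an independent scan of the whole input (nested scan instead of single-pass aggregation), and finally filters the names whose total equals the maximum floored at 0.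
import Mathlib
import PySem

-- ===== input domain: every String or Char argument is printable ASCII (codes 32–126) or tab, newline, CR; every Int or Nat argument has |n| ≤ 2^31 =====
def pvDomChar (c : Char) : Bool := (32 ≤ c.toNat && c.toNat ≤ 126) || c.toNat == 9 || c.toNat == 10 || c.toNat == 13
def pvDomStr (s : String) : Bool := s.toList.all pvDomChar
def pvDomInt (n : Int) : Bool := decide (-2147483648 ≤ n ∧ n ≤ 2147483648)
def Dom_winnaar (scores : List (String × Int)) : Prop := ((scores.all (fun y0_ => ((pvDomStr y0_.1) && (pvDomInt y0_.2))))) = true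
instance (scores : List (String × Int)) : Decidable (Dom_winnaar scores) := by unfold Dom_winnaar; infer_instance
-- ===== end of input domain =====

-- B drops A's dict and running-max loop: it lists the distinct names, totals each by its own
-- scan of the input, then filters by the 0-floored maximum (objective: alternative).

-- ===== PORT A =====
def winnaar (scores : List (String × Int)) : List String :=
  let result := scores.foldl
    (fun d p => if d.contains p.1 then d.insert p.1 (d.getD p.1 0 + p.2) else d.insert p.1 p.2)
    PySem.Dict.empty
  let st := result.items.foldl
    (fun (s : List String × Int) p =>
      if p.2 > s.2 then ([p.1], p.2)
      else if p.2 == s.2 then (s.1 ++ [p.1], s.2)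
      else s)
    ([], 0)
  st.1

-- ===== PORT B =====
def winnaar_alt (scores : List (String × Int)) : List String :=
  let names : List String := scores.foldl (fun ns p => PySem.Set.add ns p.1) []
  let totals := names.map (fun naam => (naam, ((scores.filter (fun q => q.1 == naam)).map (·.2)).sum))
  let m := (PySem.List.max? (totals.map (·.2) ++ [0]) (fun x => x)).getD 0
  (totals.filter (fun p => p.2 == m)).map (·.1)

-- ===== PRECONDITION & SPEC =====
def Spec_winnaar (scores : List (String × Int)) (out : List String) : Prop := out = winnaar_alt scores
instance (scores : List (String × Int)) (out : List String) : Decidable (Spec_winnaar scores out) := by unfold Spec_winnaar; infer_instance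

-- ===== CLAIM (what is proved, stated in full; the proofs are below) =====
def Claim_equal_winnaar : Prop := ∀ (scores : List (String × Int)), Dom_winnaar scores → Spec_winnaar scores (winnaar scores)

-- ===== LEMMAS AND PROOFS =====

-- A's two dict-building steps agree step-wise
theorem pv_dict_step_eq (d : PySem.Dict String Int) (p : String × Int) :
    (if d.contains p.1 then d.insert p.1 (d.getD p.1 0 + p.2) else d.insert p.1 p.2)
      = d.insert p.1 (d.getD p.1 0 + p.2) := by
  by_cases h : d.contains p.1 = true
  · simp [h]
  · simp only [Bool.not_eq_true] at h
    simp [h, PySem.Dict.getD_of_not_contains]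

-- running max over the second components
def pvM (l : List (String × Int)) (m : Int) : Int := l.foldl (fun a p => max a p.2) m

theorem pvM_le (l : List (String × Int)) (m : Int) : m ≤ pvM l m := by
  induction l generalizing m with
  | nil => simp [pvM]
  | cons p t ih => exact le_trans (le_max_left m p.2) (ih (max m p.2))

-- A's second loop = max-then-filter, generalized over the running state
theorem pv_loop_eq (l : List (String × Int)) (ws : List String) (m : Int) :
    (l.foldl
      (fun (s : List String × Int) p =>
        if p.2 > s.2 then ([p.1], p.2)
        else if p.2 == s.2 then (s.1 ++ [p.1], s.2)
        else s)
      (ws, m)).1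
    = (if pvM l m = m then ws else []) ++ (l.filter (fun p => p.2 == pvM l m)).map (·.1) := by
  induction l generalizing ws m with
  | nil => simp [pvM]
  | cons p t ih =>
    have hM : pvM (p :: t) m = pvM t (max m p.2) := rfl
    by_cases h1 : p.2 > m
    · have hmax : max m p.2 = p.2 := by omega
      have hgt : m < pvM (p :: t) m := by
        rw [hM, hmax]; exact lt_of_lt_of_le h1 (pvM_le t p.2)
      simp only [List.foldl_cons, if_pos h1]
      rw [ih [p.1] p.2, hM, hmax]
      have hge : p.2 ≤ pvM t p.2 := pvM_le t p.2
      have hne : ¬ pvM t p.2 = m := by omega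
      rw [if_neg hne]
      simp only [List.filter_cons, List.nil_append]
      by_cases h2 : pvM t p.2 = p.2
      · simp [h2]
      · have : (p.2 == pvM t p.2) = false := by
          simp only [beq_eq_false_iff_ne, ne_eq]; omega
        simp [h2, this]
    · have hmax : max m p.2 = m := by omega
      by_cases h2 : p.2 = m
      · have hb : (p.2 == m) = true := by simp [h2]
        simp only [List.foldl_cons, if_neg h1, hb, reduceIte]
        rw [ih (ws ++ [p.1]) m, hM, hmax]
        simp only [List.filter_cons]
        by_cases h3 : pvM t m = m
        · simp [h3, h2]
        · have : (p.2 == pvM t m) = false := by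
            have := pvM_le t m
            simp only [beq_eq_false_iff_ne, ne_eq]; omega
          simp [h3, this]
      · have hb : (p.2 == m) = false := by simp [h2]
        simp only [List.foldl_cons, if_neg h1, hb, Bool.false_eq_true, reduceIte]
        rw [ih ws m, hM, hmax]
        simp only [List.filter_cons]
        have hlt : p.2 < m := by omega
        have : (p.2 == pvM t m) = false := by
          have := pvM_le t m
          simp only [beq_eq_false_iff_ne, ne_eq]; omega
        simp [this]

-- max on foldl max commutes into the seed
theorem pv_max_foldl (l : List Int) (a b : Int) :
    max (l.foldl max a) b = l.foldl max (max a b) := by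
  induction l generalizing a with
  | nil => rfl
  | cons x t ih =>
    simp only [List.foldl_cons]
    rw [ih (max a x)]
    have : max (max a x) b = max (max a b) x := by omega
    rw [this]

-- each entry of A's dict is the sum of that name's points
theorem pv_getD_sum (l : List (String × Int)) (d : PySem.Dict String Int) (n : String) :
    (l.foldl (fun d p => d.insert p.1 (d.getD p.1 0 + p.2)) d).getD n 0
      = d.getD n 0 + ((l.filter (fun q => q.1 == n)).map (·.2)).sum := by
  induction l generalizing d with
  | nil => simp
  | cons p t ih =>
    simp only [List.foldl_cons, List.filter_cons]
    rw [ih]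
    by_cases h : p.1 = n
    · simp [h, add_assoc]
    · have : (p.1 == n) = false := by simp [h]
      rw [PySem.Dict.getD_insert]
      simp [this, Ne.symm h]

-- the running max over pairs is the running max over the values
theorem pvM_map (l : List (String × Int)) (m : Int) :
    (l.map (·.2)).foldl max m = pvM l m := by
  unfold pvM; rw [List.foldl_map]

-- B's 0-floored max over the values = the running max seeded with 0
theorem pv_m_eq (vs : List Int) :
    (PySem.List.max? (vs ++ [0]) (fun x => x)).getD 0 = vs.foldl max 0 := by
  cases vs with
  | nil => rfl
  | cons v t =>
    rw [List.cons_append, PySem.List.max?_id_cons]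
    simp only [Option.getD_some]
    rw [List.foldl_append]
    simp only [List.foldl_cons, List.foldl_nil]
    rw [pv_max_foldl, max_comm v 0]

-- ===== VERDICT (by name: the statement is the Claim_ definition above) =====
theorem winnaar_spec : Claim_equal_winnaar := by
  intro scores _
  unfold Spec_winnaar winnaar winnaar_alt
  dsimp only
  rw [PySem.List.foldl_congr_mem (g := fun d p => d.insert p.1 (d.getD p.1 0 + p.2))
        (h := fun acc x _ => pv_dict_step_eq acc x)]
  set d := scores.foldl (fun d p => d.insert p.1 (d.getD p.1 0 + p.2)) PySem.Dict.empty with hd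
  have hnd : d.keys.Nodup := by
    rw [hd]
    exact PySem.Dict.nodup_keys_foldl_insert_key scores (·.1)
      (fun d p => d.getD p.1 0 + p.2) PySem.Dict.empty PySem.Dict.nodup_keys_empty
  -- B's names list is exactly A's dict keys
  have hnames : scores.foldl (fun ns p => PySem.Set.add ns p.1) [] = d.keys := by
    rw [hd, PySem.Dict.keys_foldl_insert_key, PySem.Dict.keys_empty,
        ← PySem.Set.update_map_eq_foldl_add]
  -- A's items are B's totals
  have hitems : d.items
      = d.keys.map (fun naam => (naam, ((scores.filter (fun q => q.1 == naam)).map (·.2)).sum)) := by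
    rw [PySem.Dict.items_eq_map_keys d hnd 0]
    apply List.map_congr_left
    intro n _
    have := pv_getD_sum scores PySem.Dict.empty n
    rw [← hd] at this
    simp [this]
  rw [pv_loop_eq d.items [] 0, hnames]
  have hm : (PySem.List.max?
      ((d.keys.map (fun naam => (naam, ((scores.filter (fun q => q.1 == naam)).map (·.2)).sum))).map (·.2) ++ [0])
      (fun x => x)).getD 0 = pvM d.items 0 := by
    rw [pv_m_eq, ← hitems, pvM_map]
  rw [hm, ← hitems]
  split_ifs <;> simp
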